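-- pv_equiv track=rewrite | github.com/Maverick7728/Proactive-Work-Life-Assistant | src/utils/name_matcher.py | _extract_names_from_text
-- ===== SOURCE A (Python) =====
-- from typing import List, Dict, Any, Optional
--
-- def _extract_names_from_text(text: str) -> List[str]:
--     """
--     Extract individual names from text
--
--     Args:
--         text: Text containing names
--
--     Returns:
--         List of extracted names
--     """
--     # Split by common separators
--     separators = [',', 'and', '&', 'with', 'for']
--     names = [text]
--
--     for sep in separators:
--         new_names = []
--         for name in names:
--             if sep in name:
--                 parts = name.split(sep)
--                 new_names.extend([part.strip() for part in parts if part.strip()])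
--             else:
--                 new_names.append(name)
--         names = new_names
--
--     return names
-- ===== SOURCE B (Python) =====
-- from typing import List
--
-- def _extract_names_from_text(text: str) -> List[str]:
--     """Single left-to-right scan that cuts the text at every occurrence of any
--     separator at once, instead of five sequential split passes."""
--     separators = (',', 'and', '&', 'with', 'for')
--     if not any(sep in text for sep in separators):
--         return [text]
--     pieces = []
--     cur = []
--     i = 0
--     n = len(text)
--     while i < n:
--         for sep in separators:
--             if text.startswith(sep, i):
--                 pieces.append(''.join(cur))
--                 cur = []
--                 i += len(sep)
--                 break
--         else:
--             cur.append(text[i])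
--             i += 1
--     pieces.append(''.join(cur))
--     return [q for q in (p.strip() for p in pieces) if q]
-- ===== Notes on version B (the rewrite author's own statement) =====
-- stated objective: alternative
-- what changed: Replaced the five sequential split-strip-filter passes (one per separator) with a single left-to-right scan that cuts the text at every occurrence of any separator at once (valid because the separators are pairwise non-overlapping), plus the no-separator passthrough.
import Mathlib
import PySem

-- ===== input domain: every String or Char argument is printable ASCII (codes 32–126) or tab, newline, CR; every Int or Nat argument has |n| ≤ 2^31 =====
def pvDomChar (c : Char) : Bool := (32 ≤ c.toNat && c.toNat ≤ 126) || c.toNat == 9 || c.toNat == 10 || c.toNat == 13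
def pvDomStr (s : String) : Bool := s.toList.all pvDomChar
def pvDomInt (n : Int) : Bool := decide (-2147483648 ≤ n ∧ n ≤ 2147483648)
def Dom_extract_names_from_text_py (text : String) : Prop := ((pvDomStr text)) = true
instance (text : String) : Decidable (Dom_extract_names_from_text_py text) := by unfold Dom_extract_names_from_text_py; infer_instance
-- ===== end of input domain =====

-- B replaces A's five sequential split/strip/filter passes by ONE left-to-right scan that
-- cuts the text at every separator occurrence at once (objective: alternative algorithm).

-- separators = [',', 'and', '&', 'with', 'for']
def pvSeps : List (List Char) := [[','], ['a','n','d'], ['&'], ['w','i','t','h'], ['f','o','r']]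

-- ===== PORT A =====
def extract_names_from_text_py (text : String) : List String :=
  (pvSeps.foldl (fun names sep =>
      names.foldl (fun new_names name =>
        if PySem.Chars.isIn sep name then
          new_names ++ ((PySem.Chars.splitOn name sep).filter
              (fun part => !(PySem.Chars.strip part).isEmpty)).map PySem.Chars.strip
        else new_names ++ [name]) []) [text.toList]).map String.ofList

-- ===== PORT B =====
-- Source B's `cur`/`pieces` while-loop: at each index try the separators in order; on a match cut.
def pvConsHead (c : Char) : List (List Char) → List (List Char)
  | [] => [[c]]
  | p :: ps => (c :: p) :: ps

-- the `max 1` only guards termination for an (unused) empty separator; every sep here is nonempty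
def pvScanS (seps : List (List Char)) : List Char → List (List Char)
  | [] => [[]]
  | c :: rest =>
    match seps.find? (fun sep => sep.isPrefixOf (c :: rest)) with
    | some sep => [] :: pvScanS seps ((c :: rest).drop (max 1 sep.length))
    | none => pvConsHead c (pvScanS seps rest)
termination_by l => l.length
decreasing_by all_goals (simp; try omega)

def extract_names_from_text_py_alt (text : String) : List String :=
  let l := text.toList
  if !(pvSeps.any (fun sep => PySem.Chars.isIn sep l)) then [text]
  else (((pvScanS pvSeps l).map PySem.Chars.strip).filter
          (fun q => !q.isEmpty)).map String.ofList

-- ===== PRECONDITION & SPEC =====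
def Spec_extract_names_from_text_py (text : String) (out : List String) : Prop := out = extract_names_from_text_py_alt text
instance (text : String) (out : List String) : Decidable (Spec_extract_names_from_text_py text out) := by unfold Spec_extract_names_from_text_py; infer_instance

-- ===== CLAIM (what is proved, stated in full; the proofs are below) =====
def Claim_equal_extract_names_from_text_py : Prop := ∀ (text : String), Dom_extract_names_from_text_py text → Spec_extract_names_from_text_py text (extract_names_from_text_py text)

-- ===== LEMMAS AND PROOFS =====

-- clean recursive form of Python's str.split(sep) (sep nonempty)
def pvSplit (sep : List Char) : List Char → List (List Char)
  | [] => [[]]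
  | c :: rest =>
    if sep.isPrefixOf (c :: rest) then [] :: pvSplit sep ((c :: rest).drop (max 1 sep.length))
    else pvConsHead c (pvSplit sep rest)
termination_by l => l.length
decreasing_by all_goals (simp; try omega)

def pvPre (pre : List Char) : List (List Char) → List (List Char)
  | [] => [pre]
  | p :: ps => (pre ++ p) :: ps

def pvLastApp (ws : List Char) : List (List Char) → List (List Char)
  | [] => [ws]
  | [p] => [p ++ ws]
  | p :: q :: ps => p :: pvLastApp ws (q :: ps)

def pvPost (X : List (List Char)) : List (List Char) :=
  (X.map PySem.Chars.strip).filter (fun q => !q.isEmpty)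

def pvPhase (sep : List Char) (names : List (List Char)) : List (List Char) :=
  names.flatMap (fun name =>
    if PySem.Chars.isIn sep name then pvPost (pvSplit sep name) else [name])

-- the separator-set facts the equivalence rests on
def pvGood (L : List (List Char)) : Prop :=
  (∀ s ∈ L, s ≠ []) ∧
  (∀ s ∈ L, ∀ c ∈ s, PySem.Chars.isspace c = false) ∧
  (∀ a ∈ L, ∀ b ∈ L, a <+: b → a = b) ∧
  (∀ a ∈ L, ∀ b ∈ L, ∀ j, j < a.length → 0 < j → (a.drop j).head? ≠ b.head?)

theorem pvGood_seps : pvGood pvSeps := by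
  refine ⟨by simp [pvSeps], by simp [pvSeps]; decide, ?_, ?_⟩
  · simp only [pvSeps, List.mem_cons, List.not_mem_nil, or_false]
    rintro a (rfl|rfl|rfl|rfl|rfl) b (rfl|rfl|rfl|rfl|rfl) h <;>
      first | rfl | (exfalso; revert h; decide)
  · simp only [pvSeps, List.mem_cons, List.not_mem_nil, or_false]
    rintro a (rfl|rfl|rfl|rfl|rfl) b (rfl|rfl|rfl|rfl|rfl) j hj h0 <;>
      simp only [List.length_cons, List.length_nil] at hj <;> interval_cases j <;> decide

theorem pvGood_tail {s : List Char} {L : List (List Char)} (h : pvGood (s :: L)) : pvGood L := by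
  obtain ⟨h1, h2, h3, h4⟩ := h
  exact ⟨fun x hx => h1 x (List.mem_cons_of_mem _ hx),
         fun x hx => h2 x (List.mem_cons_of_mem _ hx),
         fun a ha b hb => h3 a (List.mem_cons_of_mem _ ha) b (List.mem_cons_of_mem _ hb),
         fun a ha b hb => h4 a (List.mem_cons_of_mem _ ha) b (List.mem_cons_of_mem _ hb)⟩

theorem pvSplit_ne_nil (sep l) : pvSplit sep l ≠ [] := by
  fun_induction pvSplit sep l with
  | case1 => simp
  | case2 c rest h ih => simp
  | case3 c rest h ih => cases hx : pvSplit sep rest <;> simp [pvConsHead, hx]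

theorem pvScanS_ne_nil (seps l) : pvScanS seps l ≠ [] := by
  fun_induction pvScanS seps l with
  | case1 => simp
  | case2 c rest sep h ih => simp
  | case3 c rest h ih => cases hx : pvScanS seps rest <;> simp [pvConsHead, hx]

theorem pvPre_nil_of_ne {X : List (List Char)} (h : X ≠ []) : pvPre [] X = X := by
  cases X with
  | nil => exact absurd rfl h
  | cons p ps => simp [pvPre]

theorem pvPre_consHead (pre c X) : pvPre pre (pvConsHead c X) = pvPre (pre ++ [c]) X := by
  cases X <;> simp [pvPre, pvConsHead]

theorem pvConsHead_pre (c p X) : pvConsHead c (pvPre p X) = pvPre (c :: p) X := by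
  cases X <;> simp [pvPre, pvConsHead]

theorem pvConsHead_append {X : List (List Char)} (c) (Y) (h : X ≠ []) :
    pvConsHead c (X ++ Y) = pvConsHead c X ++ Y := by
  cases X with
  | nil => exact absurd rfl h
  | cons p ps => simp [pvConsHead]

theorem pvLastApp_cons {X : List (List Char)} (ws p) (h : X ≠ []) :
    pvLastApp ws (p :: X) = p :: pvLastApp ws X := by
  cases X with
  | nil => exact absurd rfl h
  | cons q qs => simp [pvLastApp]

theorem pvConsHead_lastApp {X : List (List Char)} (c ws) (h : X ≠ []) :
    pvConsHead c (pvLastApp ws X) = pvLastApp ws (pvConsHead c X) := by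
  cases X with
  | nil => exact absurd rfl h
  | cons p ps =>
    cases ps with
    | nil => simp [pvLastApp, pvConsHead]
    | cons q qs => simp [pvLastApp, pvConsHead]

-- PySem.Chars.splitOn agrees with pvSplit for a nonempty separator
theorem pvSplitOn_go_eq (sep : List Char) (hsep : sep ≠ []) :
    ∀ (fuel : Nat) (l cur : List Char) (acc : List (List Char)), l.length ≤ fuel →
      PySem.Chars.splitOn.go sep fuel l cur acc
        = acc.reverse ++ pvPre cur.reverse (pvSplit sep l) := by
  have hs1 : 1 ≤ sep.length := by
    cases sep with
    | nil => exact absurd rfl hsep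
    | cons a b => simp
  have hmax : max 1 sep.length = sep.length := by omega
  intro fuel
  induction fuel with
  | zero =>
    intro l cur acc h
    have hl : l = [] := by
      cases l with
      | nil => rfl
      | cons a b => simp at h
    subst hl
    rw [PySem.Chars.splitOn.go]
    simp [pvSplit, pvPre]
  | succ fuel ih =>
    intro l cur acc h
    cases l with
    | nil =>
      rw [PySem.Chars.splitOn.go]
      · simp [pvSplit, pvPre]
      · simp
    | cons c rest =>
      rw [PySem.Chars.splitOn.go]
      by_cases hp : sep.isPrefixOf (c :: rest)
      · simp only [hp, if_true]
        have hb : ((c :: rest).drop sep.length).length ≤ fuel := by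
          simp only [List.length_drop, List.length_cons]
          simp only [List.length_cons] at h
          omega
        rw [ih _ _ _ hb]
        rw [show pvSplit sep (c :: rest) = [] :: pvSplit sep ((c :: rest).drop (max 1 sep.length)) by
              rw [pvSplit]; simp [hp]]
        rw [hmax, List.reverse_nil, pvPre_nil_of_ne (pvSplit_ne_nil _ _)]
        simp [pvPre]
      · simp only [hp, if_false, Bool.false_eq_true]
        rw [ih _ _ _ (by simp at h ⊢; omega)]
        rw [show pvSplit sep (c :: rest) = pvConsHead c (pvSplit sep rest) by
              rw [pvSplit]; simp [hp]]
        rw [pvPre_consHead]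
        simp

theorem pvSplitOn_eq (sep l : List Char) (hsep : sep ≠ []) :
    PySem.Chars.splitOn l sep = pvSplit sep l := by
  unfold PySem.Chars.splitOn
  rw [pvSplitOn_go_eq sep hsep _ _ _ _ (by omega)]
  simp [pvPre_nil_of_ne (pvSplit_ne_nil _ _)]

-- find? helpers
theorem pvFind?_unique {α : Type} {L : List α} {p : α → Bool} {r : α}
    (hu : ∀ x ∈ L, p x = true → x = r) (hr : r ∈ L) (hp : p r = true) :
    L.find? p = some r := by
  induction L with
  | nil => cases hr
  | cons a as ih =>
    by_cases ha : p a = true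
    · have : a = r := hu a (List.mem_cons_self) ha
      subst this
      simp [List.find?_cons, ha]
    · have ha' : p a = false := by simpa using ha
      simp only [List.find?_cons, ha']
      rcases List.mem_cons.mp hr with rfl | hr'
      · exact absurd hp ha
      · exact ih (fun x hx => hu x (List.mem_cons_of_mem _ hx)) hr'

theorem pvFind?_congr {α : Type} {L : List α} {p q : α → Bool}
    (h : ∀ x ∈ L, p x = q x) : L.find? p = L.find? q := by
  induction L with
  | nil => rfl
  | cons a as ih =>
    have := h a List.mem_cons_self
    simp only [List.find?_cons, ← this]
    cases hp : p a
    · exact ih fun x hx => h x (List.mem_cons_of_mem _ hx)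
    · rfl


theorem pvScanS_nil (seps : List (List Char)) : pvScanS seps [] = [[]] := by rw [pvScanS]

theorem pvScanS_some {seps : List (List Char)} {l sep : List Char} (hl : l ≠ [])
    (hf : seps.find? (fun sep => sep.isPrefixOf l) = some sep) :
    pvScanS seps l = [] :: pvScanS seps (l.drop (max 1 sep.length)) := by
  cases l with
  | nil => exact absurd rfl hl
  | cons c rest => rw [pvScanS, hf]

theorem pvScanS_none {seps : List (List Char)} {c : Char} {rest : List Char}
    (hf : seps.find? (fun sep => sep.isPrefixOf (c :: rest)) = none) :
    pvScanS seps (c :: rest) = pvConsHead c (pvScanS seps rest) := by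
  rw [pvScanS, hf]

theorem pvSplit_nil (sep : List Char) : pvSplit sep [] = [[]] := by rw [pvSplit]

theorem pvSplit_pos {sep : List Char} {c : Char} {rest : List Char}
    (hp : sep.isPrefixOf (c :: rest) = true) :
    pvSplit sep (c :: rest) = [] :: pvSplit sep ((c :: rest).drop (max 1 sep.length)) := by
  rw [pvSplit]; simp [hp]

theorem pvSplit_neg {sep : List Char} {c : Char} {rest : List Char}
    (hp : ¬ sep.isPrefixOf (c :: rest) = true) :
    pvSplit sep (c :: rest) = pvConsHead c (pvSplit sep rest) := by
  rw [pvSplit]; simp [hp]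

theorem pvSplit_head_prefix {sep : List Char} :
    ∀ {l p0 : List Char} {ps : List (List Char)}, pvSplit sep l = p0 :: ps → p0 <+: l := by
  intro l
  fun_induction pvSplit sep l with
  | case1 =>
    intro p0 ps h
    simp at h
    simp [h.1]
  | case2 c rest hp ih =>
    intro p0 ps h
    simp at h
    simp [h.1]
  | case3 c rest hp ih =>
    intro p0 ps h
    obtain ⟨q0, qs, hq⟩ : ∃ q0 qs, pvSplit sep rest = q0 :: qs := by
      cases hx : pvSplit sep rest with
      | nil => exact absurd hx (pvSplit_ne_nil _ _)
      | cons a b => exact ⟨a, b, rfl⟩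
    rw [hq] at h
    simp [pvConsHead] at h
    rcases h with ⟨rfl, rfl⟩
    exact List.cons_prefix_cons.mpr ⟨rfl, ih hq⟩

-- L2a: no sep occurrence starts in the first k characters → split skips them
theorem pvSplit_shift (sep : List Char) :
    ∀ (k : Nat) (l : List Char), k ≤ l.length →
      (∀ j, j < k → ¬ sep <+: l.drop j) →
      pvSplit sep l = pvPre (l.take k) (pvSplit sep (l.drop k)) := by
  intro k
  induction k with
  | zero =>
    intro l _ _
    simp [List.take_zero, List.drop_zero, pvPre_nil_of_ne (pvSplit_ne_nil _ _)]
  | succ k ih =>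
    intro l hk h
    cases l with
    | nil => simp at hk
    | cons c rest =>
      have h0 : ¬ sep.isPrefixOf (c :: rest) = true := by
        intro hp
        exact h 0 (Nat.succ_pos _) (by simpa using List.isPrefixOf_iff_prefix.mp hp)
      rw [pvSplit_neg h0]
      rw [ih rest (by simpa using hk)
            (fun j hj => by simpa [List.drop_succ_cons] using h (j + 1) (by omega))]
      rw [pvConsHead_pre]
      simp [pvPre, List.take_succ_cons, List.drop_succ_cons]

-- L2: scanning with (s1 :: rest) = split by s1, then scan the raw pieces with rest
theorem pvScan_split {s1 : List Char} {rest : List (List Char)} (hg : pvGood (s1 :: rest)) :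
    ∀ l, pvScanS (s1 :: rest) l = (pvSplit s1 l).flatMap (pvScanS rest) := by
  obtain ⟨hne, hsp, hpf, hcr⟩ := hg
  have hs1ne : s1 ≠ [] := hne s1 List.mem_cons_self
  have hs1len : 1 ≤ s1.length := by
    cases s1 with
    | nil => exact absurd rfl hs1ne
    | cons a b => simp
  have hhead : ∀ (x t : List Char), x ≠ [] → (x ++ t).head? = x.head? := by
    intro x t hx
    cases x with
    | nil => exact absurd rfl hx
    | cons a b => simp
  have hprefix_head : ∀ (x y : List Char), x ≠ [] → x <+: y → y.head? = x.head? := by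
    intro x y hx hp
    obtain ⟨t, rfl⟩ := hp
    exact hhead x t hx
  suffices H : ∀ (n : Nat) (l : List Char), l.length ≤ n →
      pvScanS (s1 :: rest) l = (pvSplit s1 l).flatMap (pvScanS rest) by
    intro l; exact H l.length l le_rfl
  intro n
  induction n with
  | zero =>
    intro l hl
    have : l = [] := by
      cases l with
      | nil => rfl
      | cons a b => simp at hl
    subst this
    rw [pvScanS_nil, pvSplit_nil]
    simp [pvScanS_nil]
  | succ n ih =>
    intro l hl
    cases l with
    | nil =>
      rw [pvScanS_nil, pvSplit_nil]
      simp [pvScanS_nil]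
    | cons c cs =>
      by_cases h1 : s1.isPrefixOf (c :: cs) = true
      · -- s1 matches at the head: both sides cut here
        have hf : (s1 :: rest).find? (fun sep => sep.isPrefixOf (c :: cs)) = some s1 := by
          simp [List.find?_cons, h1]
        rw [pvScanS_some (by simp) hf, pvSplit_pos h1]
        have hmax : max 1 s1.length = s1.length := by omega
        have hlen : ((c :: cs).drop (max 1 s1.length)).length ≤ n := by
          simp only [List.length_drop, List.length_cons]
          simp only [List.length_cons] at hl
          omega
        rw [ih _ hlen]
        simp [List.flatMap_cons, pvScanS_nil]
      · by_cases h2 : ∃ sep ∈ rest, sep.isPrefixOf (c :: cs) = true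
        · -- a later separator matches at the head
          obtain ⟨sep, hmem, hsep⟩ := h2
          have hsepne : sep ≠ [] := hne sep (List.mem_cons_of_mem _ hmem)
          have hseplen : 1 ≤ sep.length := by
            cases sep with
            | nil => exact absurd rfl hsepne
            | cons a b => simp
          obtain ⟨sep', hf'⟩ : ∃ sep', rest.find? (fun sep => sep.isPrefixOf (c :: cs)) = some sep' := by
            cases hx : rest.find? (fun sep => sep.isPrefixOf (c :: cs)) with
            | none =>
              rw [List.find?_eq_none] at hx
              exact absurd hsep (by simpa using hx sep hmem)
            | some a => exact ⟨a, rfl⟩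
          -- replace sep by the one find? returns
          have hsep'mem : sep' ∈ rest := List.mem_of_find?_eq_some hf'
          have hsep'pfx : sep'.isPrefixOf (c :: cs) = true := by simpa using List.find?_some hf'
          have hsep'ne : sep' ≠ [] := hne sep' (List.mem_cons_of_mem _ hsep'mem)
          have hsep'len : 1 ≤ sep'.length := by
            cases sep' with
            | nil => exact absurd rfl hsep'ne
            | cons a b => simp
          have h1f : s1.isPrefixOf (c :: cs) = false := by
            cases hb : s1.isPrefixOf (c :: cs)
            · rfl
            · exact absurd hb h1
          have hf : (s1 :: rest).find? (fun sep => sep.isPrefixOf (c :: cs)) = some sep' := by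
            simp [List.find?_cons, h1f, hf']
          obtain ⟨t, ht⟩ := List.isPrefixOf_iff_prefix.mp hsep'pfx
          have hmax : max 1 sep'.length = sep'.length := by omega
          have hdrop : (c :: cs).drop sep'.length = t := by
            rw [← ht, List.drop_left]
          -- LHS
          rw [pvScanS_some (by simp) hf, hmax, hdrop]
          -- RHS : first skip |sep'| characters of the split
          have hshift : ∀ j, j < sep'.length → ¬ s1 <+: (c :: cs).drop j := by
            intro j hj hpfx
            rcases Nat.eq_zero_or_pos j with rfl | hj0
            · rw [List.drop_zero] at hpfx
              exact h1 (List.isPrefixOf_iff_prefix.mpr hpfx)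
            · have hd : (c :: cs).drop j = sep'.drop j ++ t := by
                rw [← ht, List.drop_append_of_le_length (by omega)]
              rw [hd] at hpfx
              have hdj : sep'.drop j ≠ [] := by
                intro hh
                have := congrArg List.length hh
                simp at this
                omega
              have h5 := hprefix_head s1 (sep'.drop j ++ t) hs1ne hpfx
              rw [hhead _ _ hdj] at h5
              exact hcr sep' (List.mem_cons_of_mem _ hsep'mem) s1 List.mem_cons_self j (by omega) hj0 h5
          rw [pvSplit_shift s1 sep'.length (c :: cs) (by rw [← ht]; simp) hshift]
          rw [hdrop, show (c :: cs).take sep'.length = sep' by rw [← ht, List.take_left]]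
          obtain ⟨p0, ps, hq⟩ : ∃ p0 ps, pvSplit s1 t = p0 :: ps := by
            cases hx : pvSplit s1 t with
            | nil => exact absurd hx (pvSplit_ne_nil _ _)
            | cons a b => exact ⟨a, b, rfl⟩
          rw [hq]
          simp only [pvPre, List.flatMap_cons]
          -- the first raw piece sep' ++ p0 rescans to [] :: pieces of p0
          have hfind2 : rest.find? (fun sep => sep.isPrefixOf (sep' ++ p0)) = some sep' := by
            refine pvFind?_unique (p := fun sep => sep.isPrefixOf (sep' ++ p0)) ?_ hsep'mem
              (List.isPrefixOf_iff_prefix.mpr (List.prefix_append _ _))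
            intro x hx hpx
            have hx1 := List.isPrefixOf_iff_prefix.mp hpx
            have hx2 : sep' <+: sep' ++ p0 := List.prefix_append _ _
            rcases Nat.le_total x.length sep'.length with hle | hle
            · exact hpf x (List.mem_cons_of_mem _ hx) sep' (List.mem_cons_of_mem _ hsep'mem)
                (List.prefix_of_prefix_length_le hx1 hx2 hle)
            · exact (hpf sep' (List.mem_cons_of_mem _ hsep'mem) x (List.mem_cons_of_mem _ hx)
                (List.prefix_of_prefix_length_le hx2 hx1 hle)).symm
          have hscan2 : pvScanS rest (sep' ++ p0) = [] :: pvScanS rest p0 := by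
            rw [pvScanS_some (by cases sep' with | nil => exact absurd rfl hsep'ne | cons a b => simp) hfind2,
                hmax, List.drop_left]
          rw [hscan2]
          have hlen : t.length ≤ n := by
            have := congrArg List.length ht
            simp only [List.length_append, List.length_cons] at this
            simp only [List.length_cons] at hl
            omega
          rw [ih _ hlen, hq]
          simp [List.flatMap_cons]
        · -- no separator matches at the head
          push_neg at h2
          have hf : (s1 :: rest).find? (fun sep => sep.isPrefixOf (c :: cs)) = none := by
            rw [List.find?_eq_none]
            intro x hx
            rcases List.mem_cons.mp hx with rfl | hx'
            · simpa using h1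
            · simpa using h2 x hx'
          rw [pvScanS_none hf]
          have hlen : cs.length ≤ n := by simpa using hl
          rw [ih _ hlen]
          have h1' : ¬ s1.isPrefixOf (c :: cs) = true := h1
          rw [pvSplit_neg h1']
          obtain ⟨p0, ps, hq⟩ : ∃ p0 ps, pvSplit s1 cs = p0 :: ps := by
            cases hx : pvSplit s1 cs with
            | nil => exact absurd hx (pvSplit_ne_nil _ _)
            | cons a b => exact ⟨a, b, rfl⟩
          rw [hq]
          have hp0 : p0 <+: cs := pvSplit_head_prefix hq
          have hfind2 : rest.find? (fun sep => sep.isPrefixOf (c :: p0)) = none := by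
            rw [List.find?_eq_none]
            intro x hx hpx
            have h8 : x.isPrefixOf (c :: cs) = true := by
              apply List.isPrefixOf_iff_prefix.mpr
              have h6 := List.isPrefixOf_iff_prefix.mp hpx
              have h7 : (c :: p0) <+: (c :: cs) := List.cons_prefix_cons.mpr ⟨rfl, hp0⟩
              exact h6.trans h7
            exact h2 x hx h8
          rw [show pvConsHead c (p0 :: ps) = (c :: p0) :: ps from rfl]
          simp only [List.flatMap_cons]
          rw [pvScanS_none hfind2]
          rw [pvConsHead_append _ _ (pvScanS_ne_nil _ _)]

-- L5: no separator occurs → the scan returns the whole string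
theorem pvScan_single {L : List (List Char)} :
    ∀ l, (∀ sep ∈ L, ¬ sep <:+: l) → pvScanS L l = [l] := by
  intro l
  induction l with
  | nil => intro _; exact pvScanS_nil L
  | cons c cs ih =>
    intro h
    have hf : L.find? (fun sep => sep.isPrefixOf (c :: cs)) = none := by
      rw [List.find?_eq_none]
      intro x hx hpx
      exact h x hx (List.isPrefixOf_iff_prefix.mp hpx).isInfix
    rw [pvScanS_none hf,
        ih (fun sep hs hinf => h sep hs (hinf.trans (List.suffix_cons c cs).isInfix))]
    rfl

-- L4: a separator that does not occur can be dropped from the scan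
theorem pvScan_drop_sep {s1 : List Char} {rest : List (List Char)} :
    ∀ l, ¬ s1 <:+: l → pvScanS (s1 :: rest) l = pvScanS rest l := by
  suffices H : ∀ (n : Nat) (l : List Char), l.length ≤ n → ¬ s1 <:+: l →
      pvScanS (s1 :: rest) l = pvScanS rest l by
    intro l; exact H l.length l le_rfl
  intro n
  induction n with
  | zero =>
    intro l hl h
    have : l = [] := by
      cases l with
      | nil => rfl
      | cons a b => simp at hl
    subst this
    rw [pvScanS_nil, pvScanS_nil]
  | succ n ih =>
    intro l hl h
    cases l with
    | nil => rw [pvScanS_nil, pvScanS_nil]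
    | cons c cs =>
      have h1f : s1.isPrefixOf (c :: cs) = false := by
        cases hb : s1.isPrefixOf (c :: cs)
        · rfl
        · exact absurd (List.isPrefixOf_iff_prefix.mp hb).isInfix h
      have hfind : (s1 :: rest).find? (fun sep => sep.isPrefixOf (c :: cs))
          = rest.find? (fun sep => sep.isPrefixOf (c :: cs)) := by
        simp [List.find?_cons, h1f]
      cases hf : rest.find? (fun sep => sep.isPrefixOf (c :: cs)) with
      | some sep =>
        rw [pvScanS_some (by simp) (hfind.trans hf), pvScanS_some (by simp) hf]
        congr 1
        apply ih
        · simp only [List.length_drop, List.length_cons]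
          simp only [List.length_cons] at hl
          omega
        · intro hinf
          exact h (hinf.trans (List.drop_suffix _ _).isInfix)
      | none =>
        rw [pvScanS_none (hfind.trans hf), pvScanS_none hf]
        congr 1
        exact ih cs (by simpa using hl)
          (fun hinf => h (hinf.trans (List.suffix_cons c cs).isInfix))

-- L6: leading whitespace never matches a separator
theorem pvScan_ws_front {L : List (List Char)}
    (hL : ∀ s ∈ L, ∀ c ∈ s, PySem.Chars.isspace c = false) (hne : ∀ s ∈ L, s ≠ []) :
    ∀ ws s, (∀ c ∈ ws, PySem.Chars.isspace c = true) →
      pvScanS L (ws ++ s) = pvPre ws (pvScanS L s) := by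
  intro ws
  induction ws with
  | nil => intro s _; simp [pvPre_nil_of_ne (pvScanS_ne_nil _ _)]
  | cons w ws' ih =>
    intro s h
    have hwsp : PySem.Chars.isspace w = true := h w List.mem_cons_self
    have hf : L.find? (fun sep => sep.isPrefixOf (w :: (ws' ++ s))) = none := by
      rw [List.find?_eq_none]
      intro x hx hpx
      cases x with
      | nil => exact hne [] hx rfl
      | cons a b =>
        have ha : a = w := (List.cons_prefix_cons.mp (List.isPrefixOf_iff_prefix.mp hpx)).1
        have := hL (a :: b) hx a List.mem_cons_self
        rw [ha, hwsp] at this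
        exact absurd this (by simp)
    rw [show (w :: ws') ++ s = w :: (ws' ++ s) from rfl, pvScanS_none hf,
        ih s (fun c hc => h c (List.mem_cons_of_mem _ hc)), pvConsHead_pre]

-- L7: trailing whitespace never matches a separator
theorem pvScan_ws_back {L : List (List Char)}
    (hL : ∀ s ∈ L, ∀ c ∈ s, PySem.Chars.isspace c = false) (hne : ∀ s ∈ L, s ≠ []) :
    ∀ s ws, (∀ c ∈ ws, PySem.Chars.isspace c = true) →
      pvScanS L (s ++ ws) = pvLastApp ws (pvScanS L s) := by
  suffices H : ∀ (n : Nat) (s : List Char), s.length ≤ n →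
      ∀ ws, (∀ c ∈ ws, PySem.Chars.isspace c = true) →
        pvScanS L (s ++ ws) = pvLastApp ws (pvScanS L s) by
    intro s ws h; exact H s.length s le_rfl ws h
  have base : ∀ ws, (∀ c ∈ ws, PySem.Chars.isspace c = true) →
      pvScanS L ([] ++ ws) = pvLastApp ws (pvScanS L []) := by
    intro ws h
    rw [List.nil_append, pvScanS_nil]
    rw [pvScan_single ws (fun sep hs hinf => ?_)]
    · simp [pvLastApp]
    · -- a separator inside all-space ws would have a space character
      have hsepne : sep ≠ [] := hne sep hs
      cases sep with
      | nil => exact hsepne rfl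
      | cons a b =>
        have ha : a ∈ ws := hinf.subset List.mem_cons_self
        have := hL (a :: b) hs a List.mem_cons_self
        rw [h a ha] at this
        exact absurd this (by simp)
  intro n
  induction n with
  | zero =>
    intro s hl ws h
    have : s = [] := by
      cases s with
      | nil => rfl
      | cons a b => simp at hl
    subst this
    exact base ws h
  | succ n ih =>
    intro s hl ws h
    cases s with
    | nil => exact base ws h
    | cons c cs =>
      have hcong : ∀ x ∈ L, x.isPrefixOf ((c :: cs) ++ ws) = x.isPrefixOf (c :: cs) := by
        intro x hx
        cases hb : x.isPrefixOf (c :: cs) with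
        | true =>
          exact List.isPrefixOf_iff_prefix.mpr
            ((List.isPrefixOf_iff_prefix.mp hb).trans (List.prefix_append _ _))
        | false =>
          cases hb2 : x.isPrefixOf ((c :: cs) ++ ws) with
          | false => rfl
          | true =>
            exfalso
            have hx2 := List.isPrefixOf_iff_prefix.mp hb2
            rcases Nat.le_total x.length (c :: cs).length with hle | hle
            · have : x <+: (c :: cs) :=
                List.prefix_of_prefix_length_le hx2 (List.prefix_append _ _) hle
              rw [List.isPrefixOf_iff_prefix.mpr this] at hb
              simp at hb
            · have hcx : (c :: cs) <+: x :=
                List.prefix_of_prefix_length_le (List.prefix_append _ _) hx2 hle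
              obtain ⟨u, hu⟩ := hcx
              -- u is a nonempty part of x lying inside ws: its head is a space char of x
              have hune : u ≠ [] := by
                intro huu
                rw [huu, List.append_nil] at hu
                rw [← hu] at hb
                have htr : (c :: cs).isPrefixOf (c :: cs) = true :=
                  List.isPrefixOf_iff_prefix.mpr List.prefix_rfl
                rw [htr] at hb
                simp at hb
              cases u with
              | nil => exact hune rfl
              | cons a b =>
                have hmem : a ∈ x := by rw [← hu]; simp
                have hpu : (a :: b) <+: ws := by
                  rw [← hu] at hx2
                  exact (List.prefix_append_right_inj (c :: cs)).mp hx2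
                have haws : a ∈ ws := hpu.subset List.mem_cons_self
                have := hL x hx a hmem
                rw [h a haws] at this
                exact absurd this (by simp)
      have hfind := pvFind?_congr hcong
      cases hf : L.find? (fun sep => sep.isPrefixOf (c :: cs)) with
      | some sep =>
        have hsep : sep <+: (c :: cs) := List.isPrefixOf_iff_prefix.mp (by simpa using List.find?_some hf)
        have hmemL := List.mem_of_find?_eq_some hf
        have hsepne : sep ≠ [] := hne sep hmemL
        have hslen : 1 ≤ sep.length := by
          cases sep with
          | nil => exact absurd rfl hsepne
          | cons a b => simp
        have hsle : sep.length ≤ (c :: cs).length := hsep.length_le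
        have hmax : max 1 sep.length = sep.length := by omega
        rw [pvScanS_some (by simp) ((hfind.trans hf)), pvScanS_some (by simp) hf, hmax]
        rw [List.drop_append_of_le_length hsle]
        rw [pvLastApp_cons _ _ (pvScanS_ne_nil _ _)]
        congr 1
        apply ih _ ?_ _ h
        simp only [List.length_drop, List.length_cons]
        simp only [List.length_cons] at hl
        omega
      | none =>
        rw [show (c :: cs) ++ ws = c :: (cs ++ ws) from rfl, pvScanS_none (by
              rw [show c :: (cs ++ ws) = (c :: cs) ++ ws from rfl]; exact hfind.trans hf),
            pvScanS_none hf]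
        rw [ih cs (by simpa using hl) ws h]
        rw [pvConsHead_lastApp _ _ (pvScanS_ne_nil _ _)]

-- strip facts
theorem pvDropWhile_idem {α : Type} (p : α → Bool) (l : List α) :
    (l.dropWhile p).dropWhile p = l.dropWhile p := by
  induction l with
  | nil => rfl
  | cons c t ih =>
    by_cases hc : p c = true
    · simp [List.dropWhile_cons, hc, ih]
    · simp [List.dropWhile_cons, hc]

theorem pvDropWhile_head {α : Type} (p : α → Bool) (l : List α) {c : α} {t : List α}
    (h : l.dropWhile p = c :: t) : p c = false := by
  induction l with
  | nil => simp at h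
  | cons a b ih =>
    by_cases ha : p a = true
    · rw [List.dropWhile_cons, if_pos ha] at h
      exact ih h
    · rw [List.dropWhile_cons, if_neg ha] at h
      cases h
      simpa using ha

theorem pvRstrip_append_ws {ws y : List Char} (h : ∀ c ∈ ws, PySem.Chars.isspace c = true) :
    PySem.Chars.rstrip (y ++ ws) = PySem.Chars.rstrip y := by
  have hws0 : ws.reverse.dropWhile PySem.Chars.isspace = [] :=
    List.dropWhile_eq_nil_iff.mpr (fun x hx => h x (by simpa using hx))
  simp [PySem.Chars.rstrip, List.reverse_append, List.dropWhile_append, hws0]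

theorem pvStrip_allspace {ws : List Char} (h : ∀ c ∈ ws, PySem.Chars.isspace c = true) :
    PySem.Chars.strip ws = [] := by
  have h1 : PySem.Chars.lstrip ws = [] := List.dropWhile_eq_nil_iff.mpr h
  simp [PySem.Chars.strip, h1, PySem.Chars.rstrip]

theorem pvStrip_decomp (q : List Char) :
    ∃ ws1 ws2, (∀ c ∈ ws1, PySem.Chars.isspace c = true) ∧
      (∀ c ∈ ws2, PySem.Chars.isspace c = true) ∧ q = ws1 ++ PySem.Chars.strip q ++ ws2 := by
  refine ⟨q.takeWhile PySem.Chars.isspace,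
    ((PySem.Chars.lstrip q).reverse.takeWhile PySem.Chars.isspace).reverse, ?_, ?_, ?_⟩
  · intro c hc; exact List.mem_takeWhile_imp hc
  · intro c hc; exact List.mem_takeWhile_imp (by simpa using hc)
  · have hm : PySem.Chars.lstrip q
        = PySem.Chars.strip q ++ ((PySem.Chars.lstrip q).reverse.takeWhile PySem.Chars.isspace).reverse := by
      have h1 : (PySem.Chars.lstrip q).reverse
          = (PySem.Chars.lstrip q).reverse.takeWhile PySem.Chars.isspace
            ++ (PySem.Chars.lstrip q).reverse.dropWhile PySem.Chars.isspace :=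
        (List.takeWhile_append_dropWhile).symm
      have h2 := congrArg List.reverse h1
      simp only [List.reverse_reverse, List.reverse_append] at h2
      simpa [PySem.Chars.strip, PySem.Chars.rstrip] using h2
    calc q = q.takeWhile PySem.Chars.isspace ++ PySem.Chars.lstrip q := by
            rw [show PySem.Chars.lstrip q = q.dropWhile PySem.Chars.isspace from rfl,
                List.takeWhile_append_dropWhile]
      _ = _ := by
            rw [List.append_assoc]
            exact congrArg (fun z => List.takeWhile PySem.Chars.isspace q ++ z) hm

theorem pvStrip_ws_append {ws x : List Char} (h : ∀ c ∈ ws, PySem.Chars.isspace c = true) :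
    PySem.Chars.strip (ws ++ x) = PySem.Chars.strip x := by
  have hws0 : ws.dropWhile PySem.Chars.isspace = [] := List.dropWhile_eq_nil_iff.mpr h
  have h1 : PySem.Chars.lstrip (ws ++ x) = PySem.Chars.lstrip x := by
    simp [PySem.Chars.lstrip, List.dropWhile_append, hws0]
  simp [PySem.Chars.strip, h1]

theorem pvStrip_append_ws {ws x : List Char} (h : ∀ c ∈ ws, PySem.Chars.isspace c = true) :
    PySem.Chars.strip (x ++ ws) = PySem.Chars.strip x := by
  by_cases h0 : x.dropWhile PySem.Chars.isspace = []
  · have hx : ∀ c ∈ x, PySem.Chars.isspace c = true := List.dropWhile_eq_nil_iff.mp h0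
    rw [pvStrip_allspace (fun c hc => by
          rcases List.mem_append.mp hc with h5 | h5
          · exact hx c h5
          · exact h c h5),
        pvStrip_allspace hx]
  · have h1 : PySem.Chars.lstrip (x ++ ws) = PySem.Chars.lstrip x ++ ws := by
      simp only [PySem.Chars.lstrip, List.dropWhile_append]
      rw [if_neg (by simpa using h0)]
    simp only [PySem.Chars.strip, h1]
    exact pvRstrip_append_ws h

theorem pvStrip_strip (q : List Char) :
    PySem.Chars.strip (PySem.Chars.strip q) = PySem.Chars.strip q := by
  have hr2 : ∀ y : List Char, PySem.Chars.rstrip (PySem.Chars.rstrip y) = PySem.Chars.rstrip y := by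
    intro y
    simp [PySem.Chars.rstrip, pvDropWhile_idem]
  have hdecomp : PySem.Chars.lstrip q
      = PySem.Chars.rstrip (PySem.Chars.lstrip q)
        ++ ((PySem.Chars.lstrip q).reverse.takeWhile PySem.Chars.isspace).reverse := by
    have h1 : (PySem.Chars.lstrip q).reverse
        = (PySem.Chars.lstrip q).reverse.takeWhile PySem.Chars.isspace
          ++ (PySem.Chars.lstrip q).reverse.dropWhile PySem.Chars.isspace :=
      (List.takeWhile_append_dropWhile).symm
    have h2 := congrArg List.reverse h1
    simp only [List.reverse_reverse, List.reverse_append] at h2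
    simpa [PySem.Chars.rstrip] using h2
  have hl : PySem.Chars.lstrip (PySem.Chars.rstrip (PySem.Chars.lstrip q))
      = PySem.Chars.rstrip (PySem.Chars.lstrip q) := by
    cases hr : PySem.Chars.rstrip (PySem.Chars.lstrip q) with
    | nil => rfl
    | cons a t =>
      have hm : q.dropWhile PySem.Chars.isspace
          = a :: (t ++ ((PySem.Chars.lstrip q).reverse.takeWhile PySem.Chars.isspace).reverse) := by
        have := hdecomp
        rw [hr] at this
        simpa [PySem.Chars.lstrip] using this
      have ha : PySem.Chars.isspace a = false := pvDropWhile_head _ q hm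
      simp [PySem.Chars.lstrip, List.dropWhile_cons, ha]
  show PySem.Chars.rstrip (PySem.Chars.lstrip (PySem.Chars.rstrip (PySem.Chars.lstrip q)))
      = PySem.Chars.rstrip (PySem.Chars.lstrip q)
  rw [hl, hr2]

-- pvPost facts
theorem pvPost_append (X Y) : pvPost (X ++ Y) = pvPost X ++ pvPost Y := by
  simp [pvPost]

theorem pvPost_cons (p X) :
    pvPost (p :: X) = (if (PySem.Chars.strip p).isEmpty then [] else [PySem.Chars.strip p]) ++ pvPost X := by
  by_cases h : (PySem.Chars.strip p).isEmpty <;> simp [pvPost, List.filter_cons, h]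

theorem pvPost_flatMap {α : Type} (f : α → List (List Char)) (X : List α) :
    pvPost (X.flatMap f) = X.flatMap (fun x => pvPost (f x)) := by
  induction X with
  | nil => simp [pvPost]
  | cons a as ih => simp [List.flatMap_cons, pvPost_append, ih]

theorem pvPost_pre {ws : List Char} {X : List (List Char)}
    (hws : ∀ c ∈ ws, PySem.Chars.isspace c = true) (hX : X ≠ []) :
    pvPost (pvPre ws X) = pvPost X := by
  cases X with
  | nil => exact absurd rfl hX
  | cons p ps => simp [pvPre, pvPost, pvStrip_ws_append hws]

theorem pvPost_lastApp {ws : List Char} (hws : ∀ c ∈ ws, PySem.Chars.isspace c = true) :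
    ∀ X, pvPost (pvLastApp ws X) = pvPost X := by
  intro X
  induction X with
  | nil => simp [pvLastApp, pvPost, pvStrip_allspace hws]
  | cons p ps ih =>
    cases ps with
    | nil => simp [pvLastApp, pvPost, pvStrip_append_ws hws]
    | cons q qs =>
      have h1 : pvLastApp ws (p :: q :: qs) = p :: pvLastApp ws (q :: qs) := by simp [pvLastApp]
      rw [h1, pvPost_cons, pvPost_cons, ih]


theorem pvPost_eq_flatMap (X : List (List Char)) :
    pvPost X = X.flatMap (fun q =>
      if (PySem.Chars.strip q).isEmpty then [] else [PySem.Chars.strip q]) := by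
  induction X with
  | nil => simp [pvPost]
  | cons p ps ih => rw [pvPost_cons, List.flatMap_cons, ih]

theorem pvFoldl_phase_flatMap (seps : List (List Char)) :
    ∀ names : List (List Char),
      seps.foldl (fun ns sep => pvPhase sep ns) names
        = names.flatMap (fun x => seps.foldl (fun ns sep => pvPhase sep ns) [x]) := by
  induction seps with
  | nil => intro names; simp
  | cons sep rest ih =>
    intro names
    rw [List.foldl_cons, ih (pvPhase sep names)]
    have h1 : pvPhase sep names = names.flatMap (fun x => pvPhase sep [x]) := by
      simp [pvPhase]
    rw [h1, List.flatMap_assoc]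
    refine congrArg (fun f => List.flatMap f names) (funext fun x => ?_)
    rw [List.foldl_cons, ih (pvPhase sep [x])]

-- MAIN: A's phase pipeline = guard + simultaneous scan + strip/filter
theorem pvMain : ∀ {L : List (List Char)}, pvGood L →
    ∀ n, L.foldl (fun ns sep => pvPhase sep ns) [n]
      = if L.any (fun sep => PySem.Chars.isIn sep n) then pvPost (pvScanS L n) else [n] := by
  intro L
  induction L with
  | nil => intro _ n; simp
  | cons sep rest ih =>
    intro hg n
    have hg' : pvGood rest := pvGood_tail hg
    obtain ⟨hne, hsp, hpf, hcr⟩ := hg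
    have hne' : ∀ s ∈ rest, s ≠ [] := fun x hx => hne x (List.mem_cons_of_mem _ hx)
    have hsp' : ∀ s ∈ rest, ∀ c ∈ s, PySem.Chars.isspace c = false :=
      fun x hx => hsp x (List.mem_cons_of_mem _ hx)
    rw [List.foldl_cons]
    have hphase : pvPhase sep [n]
        = if PySem.Chars.isIn sep n then pvPost (pvSplit sep n) else [n] := by
      simp [pvPhase]
    by_cases hin : PySem.Chars.isIn sep n = true
    · -- sep occurs in n: A splits by it, B's scan cuts at it
      rw [hphase, if_pos hin]
      rw [pvFoldl_phase_flatMap rest (pvPost (pvSplit sep n))]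
      rw [show (sep :: rest).any (fun sep => PySem.Chars.isIn sep n) = true by simp [List.any_cons, hin]]
      rw [if_pos rfl]
      rw [pvScan_split ⟨hne, hsp, hpf, hcr⟩ n, pvPost_flatMap]
      rw [pvPost_eq_flatMap (pvSplit sep n), List.flatMap_assoc]
      refine congrArg (fun f => List.flatMap f (pvSplit sep n)) (funext fun q => ?_)
      -- per raw piece q: strip-filter it, then run the remaining phases
      obtain ⟨ws1, ws2, hw1, hw2, hq⟩ := pvStrip_decomp q
      have hkey : pvPost (pvScanS rest q) = pvPost (pvScanS rest (PySem.Chars.strip q)) := by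
        conv_lhs => rw [hq]
        rw [List.append_assoc, pvScan_ws_front hsp' hne' ws1 _ hw1,
            pvScan_ws_back hsp' hne' _ ws2 hw2,
            pvPost_pre hw1 (by
              cases hx : pvLastApp ws2 (pvScanS rest (PySem.Chars.strip q)) with
              | nil =>
                exfalso
                cases hy : pvScanS rest (PySem.Chars.strip q) with
                | nil => exact pvScanS_ne_nil _ _ hy
                | cons a b =>
                  rw [hy] at hx
                  cases b with
                  | nil => simp [pvLastApp] at hx
                  | cons a2 b2 => simp [pvLastApp] at hx
              | cons a b => simp),
            pvPost_lastApp hw2]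
      by_cases hempty : (PySem.Chars.strip q).isEmpty = true
      · rw [if_pos hempty]
        have hstripnil : PySem.Chars.strip q = [] := by simpa using hempty
        rw [hkey, hstripnil, pvScanS_nil]
        simp [pvPost, PySem.Chars.strip, PySem.Chars.lstrip, PySem.Chars.rstrip]
      · rw [if_neg hempty]
        have hstripne : PySem.Chars.strip q ≠ [] := by simpa using hempty
        rw [List.flatMap_cons, List.flatMap_nil, List.append_nil]
        rw [ih hg' (PySem.Chars.strip q)]
        by_cases hany : rest.any (fun s => PySem.Chars.isIn s (PySem.Chars.strip q)) = true
        · rw [if_pos hany, hkey]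
        · rw [if_neg hany]
          have hnone : ∀ s ∈ rest, ¬ s <:+: PySem.Chars.strip q := by
            intro s hs hinf
            exact hany (List.any_eq_true.mpr ⟨s, hs, (PySem.Chars.isIn_iff_infix _ _).mpr hinf⟩)
          rw [hkey, pvScan_single _ hnone]
          simp [pvPost, pvStrip_strip q, hstripne]
    · -- sep does not occur in n: A's phase passes [n] through, B's scan never matches sep
      rw [hphase, if_neg hin]
      rw [ih hg' n]
      have hnin : PySem.Chars.isIn sep n = false := by
        cases hb : PySem.Chars.isIn sep n
        · rfl
        · exact absurd hb hin
      rw [show (sep :: rest).any (fun sep => PySem.Chars.isIn sep n)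
            = rest.any (fun sep => PySem.Chars.isIn sep n) by simp [List.any_cons, hnin]]
      by_cases hany : rest.any (fun s => PySem.Chars.isIn s n) = true
      · rw [if_pos hany, if_pos hany]
        rw [pvScan_drop_sep n ((PySem.Chars.isIn_eq_false_iff _ _).mp hnin)]
      · rw [if_neg hany, if_neg hany]


-- A's inner accumulator loop is one phase
theorem pvInner (sep : List Char) (hsep : sep ≠ []) (names : List (List Char)) :
    names.foldl (fun new_names name =>
        if PySem.Chars.isIn sep name then
          new_names ++ ((PySem.Chars.splitOn name sep).filter
              (fun part => !(PySem.Chars.strip part).isEmpty)).map PySem.Chars.strip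
        else new_names ++ [name]) []
      = pvPhase sep names := by
  have h1 : ∀ (g : List Char → List (List Char)) (names : List (List Char))
      (acc : List (List Char)),
      names.foldl (fun acc n => acc ++ g n) acc = acc ++ names.flatMap g := by
    intro g names
    induction names with
    | nil => intro acc; simp
    | cons a b ihh =>
      intro acc
      rw [List.foldl_cons, ihh, List.flatMap_cons, List.append_assoc]
  have hfun : (fun (new_names : List (List Char)) name =>
        if PySem.Chars.isIn sep name then
          new_names ++ ((PySem.Chars.splitOn name sep).filter
              (fun part => !(PySem.Chars.strip part).isEmpty)).map PySem.Chars.strip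
        else new_names ++ [name])
      = (fun acc name => acc ++
          (if PySem.Chars.isIn sep name then
            ((PySem.Chars.splitOn name sep).filter
              (fun part => !(PySem.Chars.strip part).isEmpty)).map PySem.Chars.strip
          else [name])) := by
    funext acc name
    by_cases h : PySem.Chars.isIn sep name = true <;> simp [h]
  rw [hfun, h1, List.nil_append]
  unfold pvPhase
  refine congrArg (fun f => List.flatMap f names) (funext fun name => ?_)
  by_cases h : PySem.Chars.isIn sep name = true
  · rw [if_pos h, if_pos h, pvSplitOn_eq sep name hsep]
    unfold pvPost
    rw [List.filter_map]
    rfl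
  · rw [if_neg h, if_neg h]

-- ===== VERDICT (by name: the statement is the Claim_ definition above) =====
theorem extract_names_from_text_py_spec : Claim_equal_extract_names_from_text_py := by
  intro text _
  unfold Spec_extract_names_from_text_py extract_names_from_text_py extract_names_from_text_py_alt
  have houter : pvSeps.foldl (fun names sep =>
        names.foldl (fun new_names name =>
          if PySem.Chars.isIn sep name then
            new_names ++ ((PySem.Chars.splitOn name sep).filter
                (fun part => !(PySem.Chars.strip part).isEmpty)).map PySem.Chars.strip
          else new_names ++ [name]) []) [text.toList]
      = pvSeps.foldl (fun ns sep => pvPhase sep ns) [text.toList] := by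
    apply PySem.List.foldl_congr_mem
    intro acc sep hsep
    exact pvInner sep (pvGood_seps.1 sep hsep) acc
  rw [houter, pvMain pvGood_seps text.toList]
  by_cases hany : pvSeps.any (fun sep => PySem.Chars.isIn sep text.toList) = true
  · rw [if_pos hany]
    simp only [hany]
    rfl
  · have hany' : pvSeps.any (fun sep => PySem.Chars.isIn sep text.toList) = false := by
      cases hb : pvSeps.any (fun sep => PySem.Chars.isIn sep text.toList)
      · rfl
      · exact absurd hb hany
    rw [if_neg hany]
    simp only [hany']
    simp [String.ofList_toList]
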